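-- pv_equiv track=rewrite | github.com/chosungh/Baekjoon | 2110.py | router_dis
-- ===== SOURCE A (Python) =====
-- def router_dis(n:int, arr:list, left:int, right:int):
--     mid = (left + right) // 2 #첫번째 집과 마지막 집의 거리의 중간
--     result = arr[0] #공유기를 설치한 첫번째 집 위치
--     cnt = 0
--     cnt += 1 #공유기를 설치했기에 +1
--
--     if left > right: #기저 조건
--         return mid #거리
--
--     for i in range(1, len(arr)): #배열의 길이만큼 반복
--         if arr[i] - result >= mid: #만약 i번째 집의 위치와 공유기를 설치한 집과의 거리가 mid보다 크면
--             cnt += 1 #cnt +1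
--             result = arr[i] #마지막으로 공유기 설치한 집 위치
--             continue
--         elif arr[i] - result < mid: #만약 1번째 위치와 공유기를 설치한 집과의 거리가 Mid보다 작다면
--             continue #다음 집으로 넘어감
--
--     if cnt >= n: #만약 cnt가 설치할 공유기 수보다 많거나 같으면 거리가 짧다는 소리
--         return router_dis(n, arr, mid+1, right) #그래서 left를 mid+1로 바 꿈
--     else: return router_dis(n, arr, left, mid-1) #아닐 경우엔 거리가 멀다는 소리 그래서 Right를 mid-1로 바꿈
-- ===== SOURCE B (Python) =====
-- def router_dis(n: int, arr: list, left: int, right: int):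
--     def feasible(gap):
--         extra = 0
--         last = arr[0]
--         for x in arr[1:]:
--             if x - last >= gap:
--                 extra += 1
--                 last = x
--         return 1 + extra >= n
--     while left <= right:
--         mid = (left + right) // 2
--         if feasible(mid):
--             left = mid + 1
--         else:
--             right = mid - 1
--     return (left + right) // 2
-- ===== Notes on version B (the rewrite author's own statement) =====
-- stated objective: idiomatic
-- what changed: Replaced A's tail recursion by an iterative while-loop binary search whose feasibility test is factored into a boolean helper that counts extra placements instead of threading a (result,cnt) pair through the search body.
import Mathlib
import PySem

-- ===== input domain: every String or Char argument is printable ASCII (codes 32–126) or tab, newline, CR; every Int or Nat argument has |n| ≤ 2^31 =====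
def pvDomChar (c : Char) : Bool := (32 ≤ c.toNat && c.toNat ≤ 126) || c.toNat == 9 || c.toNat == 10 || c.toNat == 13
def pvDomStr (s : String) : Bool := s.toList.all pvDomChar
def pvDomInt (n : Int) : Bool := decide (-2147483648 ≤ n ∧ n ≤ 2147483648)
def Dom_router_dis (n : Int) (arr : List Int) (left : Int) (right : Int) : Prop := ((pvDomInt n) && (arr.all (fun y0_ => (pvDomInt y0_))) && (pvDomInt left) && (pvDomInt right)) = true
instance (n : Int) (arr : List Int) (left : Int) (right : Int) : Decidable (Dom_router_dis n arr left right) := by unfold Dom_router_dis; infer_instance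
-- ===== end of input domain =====

-- B replaces A's tail recursion by an iterative while-loop binary search with the greedy
-- feasibility test factored into a boolean helper (objective: idiomatic; same cost).

-- ===== PORT A =====
-- A's for-loop over indices 1..len(arr)-1, carrying (result, cnt); arr[i] for i ≥ 1
-- are exactly the elements of arr.drop 1 in order.
def scanA (arr : List Int) (mid : Int) : Int × Int :=
  (arr.drop 1).foldl
    (fun s x => if x - s.1 ≥ mid then (x, s.2 + 1) else s)
    (arr.headD 0, 1)

-- A's recursion, driven by a fuel that only makes it total: the measure (right-left+1)
-- strictly decreases, so with fuel > (right-left+1).toNat the 0-case (which returns the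
-- same mid as A's base case, reached only when left > right) never alters the result.
def goA (n : Int) (arr : List Int) : Nat → Int → Int → Int
  | 0, left, right => PySem.Int.floordiv (left + right) 2
  | fuel + 1, left, right =>
    let mid := PySem.Int.floordiv (left + right) 2
    if left > right then mid
    else
      let s := scanA arr mid
      if s.2 ≥ n then goA n arr fuel (mid + 1) right
      else goA n arr fuel left (mid - 1)

-- arr[0] raises IndexError on arr = []; Pre_ excludes that, headD 0 is a placeholder there.
def router_dis (n : Int) (arr : List Int) (left : Int) (right : Int) : Int :=
  goA n arr ((right - left + 1).toNat + 1) left right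

-- ===== PORT B =====
-- Source B's inner for-loop of `feasible`: number of EXTRA routers (beyond the one at arr[0])
-- placeable at separation ≥ gap, as structural recursion on the remaining houses.
def extraB : List Int → Int → Int → Int
  | [], _, _ => 0
  | x :: xs, last, gap =>
    if x - last ≥ gap then 1 + extraB xs x gap else extraB xs last gap

def feasibleB (n : Int) (arr : List Int) (gap : Int) : Bool :=
  1 + extraB (arr.drop 1) (arr.headD 0) gap ≥ n

-- Source B's while-loop, with the same totality fuel; on exit (and on the never-taken
-- fuel-exhaustion case) it returns (left+right)//2, as Source B does after the loop.
def whileB (n : Int) (arr : List Int) : Nat → Int → Int → Int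
  | 0, l, r => PySem.Int.floordiv (l + r) 2
  | fuel + 1, l, r =>
    if l ≤ r then
      let m := PySem.Int.floordiv (l + r) 2
      if feasibleB n arr m then whileB n arr fuel (m + 1) r
      else whileB n arr fuel l (m - 1)
    else PySem.Int.floordiv (l + r) 2

def router_dis_alt (n : Int) (arr : List Int) (left : Int) (right : Int) : Int :=
  whileB n arr ((right - left + 1).toNat + 1) left right

-- ===== PRECONDITION & SPEC =====
-- Pre_ excludes arr = [], on which A always raises IndexError at arr[0].
def Pre_router_dis (n : Int) (arr : List Int) (left : Int) (right : Int) : Prop := arr ≠ []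
instance (n : Int) (arr : List Int) (left : Int) (right : Int) : Decidable (Pre_router_dis n arr left right) := by unfold Pre_router_dis; infer_instance
def pvWitness_router_dis : Int × List Int × Int × Int := (3, ([1, 2, 8, 4, 9] : List Int), 1, 8)

def Spec_router_dis (n : Int) (arr : List Int) (left : Int) (right : Int) (out : Int) : Prop := out = router_dis_alt n arr left right
instance (n : Int) (arr : List Int) (left : Int) (right : Int) (out : Int) : Decidable (Spec_router_dis n arr left right out) := by unfold Spec_router_dis; infer_instance

-- ===== CLAIM (what is proved, stated in full; the proofs are below) =====
def Claim_equal_router_dis : Prop := ∀ (n : Int) (arr : List Int) (left : Int) (right : Int), Dom_router_dis n arr left right → Pre_router_dis n arr left right → Spec_router_dis n arr left right (router_dis n arr left right)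

-- ===== LEMMAS AND PROOFS =====

-- A's folded count from start (last, c) is c plus B's recursive extra count
theorem foldA_eq_extra (mid : Int) (l : List Int) (last c : Int) :
    (l.foldl (fun s x => if x - s.1 ≥ mid then (x, s.2 + 1) else s) (last, c)).2 =
      c + extraB l last mid := by
  induction l generalizing last c with
  | nil => simp [extraB]
  | cons x xs ih =>
    simp only [List.foldl_cons, extraB]
    by_cases h : x - last ≥ mid <;> simp [h, ih] <;> ring

-- hence B's boolean test agrees with A's `cnt >= n`
theorem feasibleB_iff (n : Int) (arr : List Int) (mid : Int) :
    feasibleB n arr mid = true ↔ (scanA arr mid).2 ≥ n := by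
  unfold feasibleB scanA
  rw [foldA_eq_extra]
  simp [add_comm]

-- at equal fuel, A's recursion and B's loop return the same value
theorem goA_eq_whileB (n : Int) (arr : List Int) (fuel : Nat) (left right : Int) :
    goA n arr fuel left right = whileB n arr fuel left right := by
  induction fuel generalizing left right with
  | zero => rfl
  | succ fuel ih =>
    rw [goA, whileB]
    by_cases h : left ≤ right
    · have h' : ¬ left > right := by omega
      simp only [h, if_true, h', if_false]
      by_cases hf : feasibleB n arr (PySem.Int.floordiv (left + right) 2) = true
      · rw [if_pos ((feasibleB_iff n arr _).mp hf), if_pos hf]; exact ih _ _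
      · rw [if_neg (fun hc => hf ((feasibleB_iff n arr _).mpr hc)), if_neg hf]; exact ih _ _
    · simp only [h, if_false, show left > right by omega, if_true]

-- ===== VERDICT (by name: the statement is the Claim_ definition above) =====
theorem router_dis_spec : Claim_equal_router_dis := by
  intro n arr l r _ _
  exact goA_eq_whileB n arr _ l r
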